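-- pv_equiv track=rewrite | github.com/JamieJamesJamie/Advent-of-Code-Python | advent_of_code/year_2025/day_01/day_01.py | part2
-- ===== SOURCE A (Python) =====
-- from collections.abc import Iterable
--
-- def part2(parsed_input: Iterable[int]) -> int:
--     """Solves part 2.
--
--     :param parsed_input: Input to parse.
--     :return: The number of times the dial points at 0 during each
--         rotation step.
--     """
--     password = 0
--     dial_pointer = 50
--
--     for rotation in parsed_input:
--         for _ in range(abs(rotation)):
--             dial_pointer += 1 if rotation >= 0 else -1
--
--             if dial_pointer % 100 == 0:
--                 password += 1
--
--     return password
-- ===== SOURCE B (Python) =====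
-- def part2(parsed_input):
--     """Count the multiples of 100 inside each rotation interval arithmetically."""
--     password = 0
--     dial_pointer = 50
--     for rotation in parsed_input:
--         if rotation >= 0:
--             password += (dial_pointer + rotation) // 100 - dial_pointer // 100
--         else:
--             password += (dial_pointer - 1) // 100 - (dial_pointer + rotation - 1) // 100
--         dial_pointer += rotation
--     return password
-- ===== Notes on version B (the rewrite author's own statement) =====
-- stated objective: faster
-- what changed: Replaces A's unit-by-unit simulation of every dial click with a per-rotation arithmetic count of the multiples of 100 in the swept interval via floor division.
import Mathlib
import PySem

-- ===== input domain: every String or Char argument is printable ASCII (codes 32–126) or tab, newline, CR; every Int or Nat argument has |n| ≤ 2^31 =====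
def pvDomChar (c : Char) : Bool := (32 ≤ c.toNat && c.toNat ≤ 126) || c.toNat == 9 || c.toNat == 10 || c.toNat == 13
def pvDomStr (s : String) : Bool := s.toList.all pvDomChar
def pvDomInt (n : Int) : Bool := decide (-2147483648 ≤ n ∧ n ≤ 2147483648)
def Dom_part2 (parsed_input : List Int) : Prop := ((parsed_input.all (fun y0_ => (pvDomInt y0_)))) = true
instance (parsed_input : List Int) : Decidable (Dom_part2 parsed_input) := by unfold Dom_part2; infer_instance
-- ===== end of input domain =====

-- B replaces A's step-by-step simulation of every unit turn by a per-rotation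
-- closed-form count of the multiples of 100 crossed (objective: faster, asymptotic).

-- ===== PORT A =====
-- inner 'for _ in range(abs(rotation))' loop of A
def part2InnerA (rotation : Int) (st : Int × Int) : Int × Int :=
  (List.range rotation.natAbs).foldl
    (fun s _ =>
      let p := s.2 + (if rotation ≥ 0 then 1 else -1)
      (s.1 + (if p % 100 = 0 then 1 else 0), p)) st

def part2 (parsed_input : List Int) : Int :=
  (parsed_input.foldl (fun st rotation => part2InnerA rotation st) (0, 50)).1

-- ===== PORT B =====
-- one fold step of Source B: add the number of multiples of 100 in the swept interval
def part2StepB (st : Int × Int) (rotation : Int) : Int × Int :=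
  if rotation ≥ 0 then
    (st.1 + (PySem.Int.floordiv (st.2 + rotation) 100 - PySem.Int.floordiv st.2 100), st.2 + rotation)
  else
    (st.1 + (PySem.Int.floordiv (st.2 - 1) 100 - PySem.Int.floordiv (st.2 + rotation - 1) 100), st.2 + rotation)

def part2_alt (parsed_input : List Int) : Int :=
  (parsed_input.foldl part2StepB (0, 50)).1

-- ===== PRECONDITION & SPEC =====
def Spec_part2 (parsed_input : List Int) (out : Int) : Prop := out = part2_alt parsed_input
instance (parsed_input : List Int) (out : Int) : Decidable (Spec_part2 parsed_input out) := by unfold Spec_part2; infer_instance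

-- ===== CLAIM (what is proved, stated in full; the proofs are below) =====
def Claim_equal_part2 : Prop := ∀ (parsed_input : List Int), Dom_part2 parsed_input → Spec_part2 parsed_input (part2 parsed_input)

-- ===== LEMMAS AND PROOFS =====

-- A's unit-step inner loop going up, in closed form
theorem innerA_pos (n : Nat) (pw p : Int) :
    ((List.range n).foldl
      (fun (s : Int × Int) _ =>
        (s.1 + (if (s.2 + 1) % 100 = 0 then 1 else 0), s.2 + 1)) (pw, p))
    = (pw + ((p + n) / 100 - p / 100), p + n) := by
  induction n with
  | zero => simp
  | succ n ih =>
    rw [List.range_succ, List.foldl_append, ih]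
    simp only [List.foldl_cons, List.foldl_nil]
    have hc : ((n : Int) + 1) = ((n + 1 : Nat) : Int) := by push_cast; ring
    by_cases h : (p + n + 1) % 100 = 0 <;> simp only [h, if_true, if_false, Prod.mk.injEq] <;> constructor <;> [skip; omega; skip; omega] <;> omega

-- A's unit-step inner loop going down, in closed form
theorem innerA_neg (n : Nat) (pw p : Int) :
    ((List.range n).foldl
      (fun (s : Int × Int) _ =>
        (s.1 + (if (s.2 + -1) % 100 = 0 then 1 else 0), s.2 + -1)) (pw, p))
    = (pw + ((p - 1) / 100 - (p - n - 1) / 100), p - n) := by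
  induction n with
  | zero => simp
  | succ n ih =>
    rw [List.range_succ, List.foldl_append, ih]
    simp only [List.foldl_cons, List.foldl_nil]
    by_cases h : (p - n - 1) % 100 = 0 <;> simp only [h, if_true, if_false, Prod.mk.injEq] <;> constructor <;> [skip; omega; skip; omega] <;> omega

-- each rotation of A equals B's closed-form step
theorem innerA_eq_stepB (rotation : Int) (st : Int × Int) :
    part2InnerA rotation st = part2StepB st rotation := by
  obtain ⟨pw, p⟩ := st
  unfold part2InnerA part2StepB
  by_cases h : rotation ≥ 0
  · have hn : (rotation.natAbs : Int) = rotation := by omega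
    simp only [h, if_pos]
    rw [innerA_pos, hn,
      PySem.Int.floordiv_eq_ediv_of_pos (by norm_num),
      PySem.Int.floordiv_eq_ediv_of_pos (by norm_num)]
  · have hn : (rotation.natAbs : Int) = -rotation := by omega
    simp only [h, if_false]
    rw [innerA_neg, hn,
      PySem.Int.floordiv_eq_ediv_of_pos (by norm_num),
      PySem.Int.floordiv_eq_ediv_of_pos (by norm_num)]
    ring_nf

-- ===== VERDICT (by name: the statement is the Claim_ definition above) =====
theorem part2_spec : Claim_equal_part2 := by
  intro parsed_input _
  unfold Spec_part2 part2 part2_alt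
  congr 1
  exact List.foldl_ext _ _ _ (fun st r _ => innerA_eq_stepB r st)
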